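-- pv_equiv track=rewrite | github.com/niamoto/niamoto | src/niamoto/gui/api/routes/templates.py | _parse_dynamic_template_id
-- ===== SOURCE A (Python) =====
-- from typing import Any, Dict, List, Optional
--
-- def _parse_dynamic_template_id(template_id: str) -> Optional[Dict[str, Any]]:
--     """Parse a dynamic template ID into column, transformer, and widget.
--
--     Dynamic template IDs have the format: {column}_{transformer}_{widget}
--     Examples:
--         - height_binned_distribution_bar_plot
--         - geo_pt_geospatial_extractor_interactive_map
--         - species_categorical_distribution_donut_chart
--         - dbh_series_extractor_bar_plot (class_object)
--
--     Returns dict with 'column', 'transformer', 'widget' or None if not parseable.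
--     """
--     # Known widget names (from PluginRegistry)
--     widget_names = [
--         "bar_plot",
--         "donut_chart",
--         "interactive_map",
--         "radial_gauge",
--         "info_grid",
--     ]
--
--     # Known transformer names (real transformers + class_object extractors)
--     transformer_names = [
--         # Real transformer plugins
--         "binned_distribution",
--         "categorical_distribution",
--         "statistical_summary",
--         "top_ranking",
--         "binary_counter",
--         "field_aggregator",
--         "geospatial_extractor",
--         "time_series_analysis",
--         # Class_object extractors (for pre-calculated CSV data)
--         "series_extractor",
--         "binary_aggregator",
--         "categories_extractor",
--     ]
--
--     # Try to match widget from the end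
--     matched_widget = None
--     for widget in widget_names:
--         if template_id.endswith(f"_{widget}"):
--             matched_widget = widget
--             break
--
--     if not matched_widget:
--         return None
--
--     # Remove widget suffix
--     remaining = template_id[: -(len(matched_widget) + 1)]
--
--     # Try to match transformer
--     matched_transformer = None
--     for transformer in transformer_names:
--         if remaining.endswith(f"_{transformer}"):
--             matched_transformer = transformer
--             break
--
--     if not matched_transformer:
--         return None
--
--     # Extract column name
--     column = remaining[: -(len(matched_transformer) + 1)]
--     if not column:
--         return None
--
--     return {
--         "column": column,
--         "transformer": matched_transformer,
--         "widget": matched_widget,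
--     }
-- ===== SOURCE B (Python) =====
-- def _parse_dynamic_template_id(template_id):
--     """Parse {column}_{transformer}_{widget} by scanning all (transformer, widget) pairs."""
--     widget_names = [
--         "bar_plot",
--         "donut_chart",
--         "interactive_map",
--         "radial_gauge",
--         "info_grid",
--     ]
--     transformer_names = [
--         "binned_distribution",
--         "categorical_distribution",
--         "statistical_summary",
--         "top_ranking",
--         "binary_counter",
--         "field_aggregator",
--         "geospatial_extractor",
--         "time_series_analysis",
--         "series_extractor",
--         "binary_aggregator",
--         "categories_extractor",
--     ]
--     for transformer in transformer_names:
--         for widget in widget_names: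
--             suffix = f"_{transformer}_{widget}"
--             if template_id.endswith(suffix):
--                 column = template_id[: -len(suffix)]
--                 if column:
--                     return {
--                         "column": column,
--                         "transformer": transformer,
--                         "widget": widget,
--                     }
--                 return None
--     return None
-- ===== Notes on version B (the rewrite author's own statement) =====
-- stated objective: alternative
-- what changed: Replaced A's two sequential suffix passes (strip the matched widget suffix, then match a transformer on the remainder, then check the column) by a single nested scan over every (transformer, widget) pair testing one combined underscore-joined suffix.
import Mathlib
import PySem

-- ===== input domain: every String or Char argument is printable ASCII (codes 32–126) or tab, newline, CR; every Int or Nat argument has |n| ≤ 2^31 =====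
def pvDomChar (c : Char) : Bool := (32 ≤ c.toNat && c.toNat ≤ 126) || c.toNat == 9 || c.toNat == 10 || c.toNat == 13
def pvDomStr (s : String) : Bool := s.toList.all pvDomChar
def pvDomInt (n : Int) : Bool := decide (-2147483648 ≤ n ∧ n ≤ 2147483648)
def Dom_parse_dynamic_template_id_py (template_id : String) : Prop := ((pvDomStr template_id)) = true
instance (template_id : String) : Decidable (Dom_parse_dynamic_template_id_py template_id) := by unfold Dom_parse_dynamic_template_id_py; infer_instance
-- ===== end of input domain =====

-- B replaces A's two sequential suffix passes (widget first, then transformer on the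
-- stripped remainder) by one nested scan over all (transformer, widget) pairs testing a
-- single combined suffix; objective: alternative decomposition, same cost.

-- ===== PORT A =====
-- the two constant name lists (module-level string literals in both Pythons)
def pvWidgetNames : List (List Char) :=
  ["bar_plot".toList, "donut_chart".toList, "interactive_map".toList,
   "radial_gauge".toList, "info_grid".toList]

def pvTransformerNames : List (List Char) :=
  ["binned_distribution".toList, "categorical_distribution".toList,
   "statistical_summary".toList, "top_ranking".toList, "binary_counter".toList,
   "field_aggregator".toList, "geospatial_extractor".toList,
   "time_series_analysis".toList, "series_extractor".toList,
   "binary_aggregator".toList, "categories_extractor".toList]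

def parse_dynamic_template_id_py (template_id : String) : Option (List (String × String)) :=
  let s := template_id.toList
  -- first loop: match widget from the end (break = find?)
  match pvWidgetNames.find? (fun w => PySem.Chars.endswith s ('_' :: w)) with
  | none => none
  | some w =>
    -- remaining = template_id[: -(len(widget) + 1)]
    let remaining := PySem.List.slice s none (some (-((w.length + 1 : Nat) : Int)))
    -- second loop: match transformer from the end of `remaining`
    match pvTransformerNames.find? (fun t => PySem.Chars.endswith remaining ('_' :: t)) with
    | none => none
    | some t =>
      -- column = remaining[: -(len(transformer) + 1)]
      let column := PySem.List.slice remaining none (some (-((t.length + 1 : Nat) : Int)))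
      if column = [] then none
      else some [("column", String.ofList column), ("transformer", String.ofList t), ("widget", String.ofList w)]

-- ===== PORT B =====
-- inner `for widget in widget_names` loop: `some r` = the Python `return r` (r may be None)
def pvScanWidgets (s t : List Char) : List (List Char) → Option (Option (List (String × String)))
  | [] => none
  | w :: ws =>
    let suffix := '_' :: t ++ '_' :: w
    if PySem.Chars.endswith s suffix then
      let column := PySem.List.slice s none (some (-((suffix.length : Nat) : Int)))
      some (if column = [] then none
            else some [("column", String.ofList column), ("transformer", String.ofList t), ("widget", String.ofList w)])
    else pvScanWidgets s t ws

-- outer `for transformer in transformer_names` loop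
def pvScanTransformers (s : List Char) : List (List Char) → Option (List (String × String))
  | [] => none
  | t :: ts =>
    match pvScanWidgets s t pvWidgetNames with
    | some r => r
    | none => pvScanTransformers s ts

def parse_dynamic_template_id_py_alt (template_id : String) : Option (List (String × String)) :=
  pvScanTransformers template_id.toList pvTransformerNames

-- ===== PRECONDITION & SPEC =====
def Spec_parse_dynamic_template_id_py (template_id : String) (out : Option (List (String × String))) : Prop := out = parse_dynamic_template_id_py_alt template_id
instance (template_id : String) (out : Option (List (String × String))) : Decidable (Spec_parse_dynamic_template_id_py template_id out) := by unfold Spec_parse_dynamic_template_id_py; infer_instance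

-- ===== CLAIM (what is proved, stated in full; the proofs are below) =====
def Claim_equal_parse_dynamic_template_id_py : Prop := ∀ (template_id : String), Dom_parse_dynamic_template_id_py template_id → Spec_parse_dynamic_template_id_py template_id (parse_dynamic_template_id_py template_id)

-- ===== LEMMAS AND PROOFS =====

-- splitting a combined suffix: a ++ b is a suffix of s iff b is, and a is a suffix of
-- what remains after stripping b
lemma pv_append_suffix_iff (a b s : List Char) :
    a ++ b <:+ s ↔ b <:+ s ∧ a <:+ s.take (s.length - b.length) := by
  constructor
  · rintro ⟨u, rfl⟩
    refine ⟨⟨u ++ a, by simp⟩, ?_⟩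
    have hlen : (u ++ (a ++ b)).length - b.length = (u ++ a).length := by simp; omega
    rw [hlen, show u ++ (a ++ b) = (u ++ a) ++ b by simp, List.take_left]
    exact ⟨u, rfl⟩
  · rintro ⟨⟨v, hv⟩, ⟨u, hu⟩⟩
    have hv' : s.take (s.length - b.length) = v := by
      subst hv; simp
    refine ⟨u, ?_⟩
    rw [hv'] at hu
    rw [← hv, ← hu]
    simp

-- none of the five "_widget" strings is a proper suffix of another (checked by kernel)
lemma pv_widgets_antichain :
    ∀ w1 ∈ pvWidgetNames, ∀ w2 ∈ pvWidgetNames, ('_' :: w1) <:+ ('_' :: w2) → w1 = w2 := by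
  decide

-- same for the eleven "_transformer" strings
lemma pv_transformers_antichain :
    ∀ t1 ∈ pvTransformerNames, ∀ t2 ∈ pvTransformerNames, ('_' :: t1) <:+ ('_' :: t2) → t1 = t2 := by
  decide

lemma pv_widget_unique {s w1 w2 : List Char} (h1 : w1 ∈ pvWidgetNames) (h2 : w2 ∈ pvWidgetNames)
    (hs1 : ('_' :: w1) <:+ s) (hs2 : ('_' :: w2) <:+ s) : w1 = w2 := by
  rcases List.suffix_or_suffix_of_suffix hs1 hs2 with h | h
  · exact pv_widgets_antichain w1 h1 w2 h2 h
  · exact (pv_widgets_antichain w2 h2 w1 h1 h).symm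

lemma pv_transformer_unique {s t1 t2 : List Char} (h1 : t1 ∈ pvTransformerNames)
    (h2 : t2 ∈ pvTransformerNames)
    (hs1 : ('_' :: t1) <:+ s) (hs2 : ('_' :: t2) <:+ s) : t1 = t2 := by
  rcases List.suffix_or_suffix_of_suffix hs1 hs2 with h | h
  · exact pv_transformers_antichain t1 h1 t2 h2 h
  · exact (pv_transformers_antichain t2 h2 t1 h1 h).symm

-- the combined test of B, in suffix form
lemma pv_pair_test_iff (s t w : List Char) :
    PySem.Chars.endswith s ('_' :: t ++ '_' :: w) = true ↔
      ('_' :: w) <:+ s ∧ ('_' :: t) <:+ s.take (s.length - (w.length + 1)) := by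
  rw [PySem.Chars.endswith_iff,
      show ('_' :: t ++ '_' :: w) = ('_' :: t) ++ ('_' :: w) by simp,
      pv_append_suffix_iff]
  simp

-- at most one (transformer, widget) pair can pass B's combined test
lemma pv_pair_unique {s t1 w1 t2 w2 : List Char}
    (ht1 : t1 ∈ pvTransformerNames) (hw1 : w1 ∈ pvWidgetNames)
    (ht2 : t2 ∈ pvTransformerNames) (hw2 : w2 ∈ pvWidgetNames)
    (h1 : PySem.Chars.endswith s ('_' :: t1 ++ '_' :: w1) = true)
    (h2 : PySem.Chars.endswith s ('_' :: t2 ++ '_' :: w2) = true) :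
    t1 = t2 ∧ w1 = w2 := by
  rw [pv_pair_test_iff] at h1 h2
  have hw : w1 = w2 := pv_widget_unique hw1 hw2 h1.1 h2.1
  subst hw
  exact ⟨pv_transformer_unique ht1 ht2 h1.2 h2.2, rfl⟩

-- value B returns at a matching pair
def pvHit (s t w : List Char) : Option (List (String × String)) :=
  let column := PySem.List.slice s none (some (-(((('_' :: t ++ '_' :: w).length) : Nat) : Int)))
  if column = [] then none
  else some [("column", String.ofList column), ("transformer", String.ofList t), ("widget", String.ofList w)]

lemma pv_scanWidgets_none {s t : List Char} {W : List (List Char)}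
    (h : ∀ w ∈ W, ¬ PySem.Chars.endswith s ('_' :: t ++ '_' :: w) = true) :
    pvScanWidgets s t W = none := by
  induction W with
  | nil => rfl
  | cons w ws ih =>
    rw [pvScanWidgets]
    simp only [h w (by simp)]
    exact ih fun w' hw' => h w' (by simp [hw'])

lemma pv_scanWidgets_some_inv {s t : List Char} {W : List (List Char)}
    {r : Option (List (String × String))}
    (h : pvScanWidgets s t W = some r) :
    ∃ w ∈ W, PySem.Chars.endswith s ('_' :: t ++ '_' :: w) = true ∧ r = pvHit s t w := by
  induction W with
  | nil => simp [pvScanWidgets] at h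
  | cons w ws ih =>
    rw [pvScanWidgets] at h
    by_cases hm : PySem.Chars.endswith s ('_' :: t ++ '_' :: w) = true
    · simp only [hm, if_true] at h
      exact ⟨w, by simp, hm, by simpa [pvHit] using h.symm⟩
    · simp only [hm] at h
      obtain ⟨w', hw', hm', hr⟩ := ih h
      exact ⟨w', by simp [hw'], hm', hr⟩

lemma pv_scanWidgets_hit {s t w : List Char} {W : List (List Char)}
    (hw : w ∈ W)
    (hm : PySem.Chars.endswith s ('_' :: t ++ '_' :: w) = true)
    (huniq : ∀ w' ∈ W, PySem.Chars.endswith s ('_' :: t ++ '_' :: w') = true → w' = w) :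
    pvScanWidgets s t W = some (pvHit s t w) := by
  induction W with
  | nil => simp at hw
  | cons w0 ws ih =>
    rw [pvScanWidgets]
    by_cases h0 : PySem.Chars.endswith s ('_' :: t ++ '_' :: w0) = true
    · have : w0 = w := huniq w0 (by simp) h0
      subst this
      simp only [h0, if_true, pvHit]
    · simp only [h0]
      have hw' : w ∈ ws := by
        rcases List.mem_cons.mp hw with rfl | h
        · exact absurd hm h0
        · exact h
      exact ih hw' fun w' h1 h2 => huniq w' (by simp [h1]) h2

lemma pv_scanTransformers_none {s : List Char} {T : List (List Char)}
    (h : ∀ t ∈ T, ∀ w ∈ pvWidgetNames, ¬ PySem.Chars.endswith s ('_' :: t ++ '_' :: w) = true) :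
    pvScanTransformers s T = none := by
  induction T with
  | nil => rfl
  | cons t ts ih =>
    rw [pvScanTransformers, pv_scanWidgets_none (h t (by simp))]
    exact ih fun t' ht' => h t' (by simp [ht'])

lemma pv_scanTransformers_hit {s t w : List Char} {T : List (List Char)}
    (hT : T.Sublist pvTransformerNames)
    (ht : t ∈ T) (hw : w ∈ pvWidgetNames)
    (htT : t ∈ pvTransformerNames)
    (hm : PySem.Chars.endswith s ('_' :: t ++ '_' :: w) = true) :
    pvScanTransformers s T = pvHit s t w := by
  induction T with
  | nil => simp at ht
  | cons t0 ts ih =>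
    have ht0 : t0 ∈ pvTransformerNames := hT.mem (by simp)
    rw [pvScanTransformers]
    cases hscan : pvScanWidgets s t0 pvWidgetNames with
    | some r =>
      obtain ⟨w', hw', hm', hr⟩ := pv_scanWidgets_some_inv hscan
      obtain ⟨hteq, hweq⟩ := pv_pair_unique ht0 hw' htT hw hm' hm
      subst hteq; subst hweq
      simpa using hr
    | none =>
      have ht' : t ∈ ts := by
        rcases List.mem_cons.mp ht with rfl | h
        · exfalso
          have := pv_scanWidgets_hit hw hm
            (fun w' hw'' hm' => (pv_pair_unique htT hw'' htT hw hm' hm).2)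
          rw [this] at hscan; simp at hscan
        · exact h
      exact ih (List.sublist_of_cons_sublist hT) ht'

-- ===== VERDICT (by name: the statement is the Claim_ definition above) =====
theorem parse_dynamic_template_id_py_spec : Claim_equal_parse_dynamic_template_id_py := by
  intro template_id _
  unfold Spec_parse_dynamic_template_id_py
  unfold parse_dynamic_template_id_py parse_dynamic_template_id_py_alt
  set s := template_id.toList with hs
  simp only []
  cases hfw : pvWidgetNames.find? (fun w => PySem.Chars.endswith s ('_' :: w)) with
  | none =>
    -- no widget suffix matches: every combined test fails
    rw [List.find?_eq_none] at hfw
    rw [pv_scanTransformers_none]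
    intro t _ w hw hpair
    exact hfw w hw ((PySem.Chars.endswith_iff _ _).mpr ((pv_pair_test_iff s t w).mp hpair).1)
  | some w =>
    have hwmem : w ∈ pvWidgetNames := List.mem_of_find?_eq_some hfw
    have hwend : PySem.Chars.endswith s ('_' :: w) = true := by
      simpa using List.find?_some hfw
    have hwsuf : ('_' :: w) <:+ s := (PySem.Chars.endswith_iff _ _).mp hwend
    have hrem : PySem.List.slice s none (some (-((w.length + 1 : Nat) : Int)))
        = s.take (s.length - (w.length + 1)) :=
      PySem.List.slice_to_neg_natCast (k := w.length + 1) s (Nat.succ_pos _)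
    dsimp only
    rw [hrem]
    set r := s.take (s.length - (w.length + 1)) with hr
    cases hft : pvTransformerNames.find? (fun t => PySem.Chars.endswith r ('_' :: t)) with
    | none =>
      rw [List.find?_eq_none] at hft
      rw [pv_scanTransformers_none]
      intro t ht w' hw' hpair
      rw [pv_pair_test_iff] at hpair
      have hweq : w' = w := pv_widget_unique hw' hwmem hpair.1 hwsuf
      subst hweq
      exact hft t ht ((PySem.Chars.endswith_iff _ _).mpr hpair.2)
    | some t =>
      have htmem : t ∈ pvTransformerNames := List.mem_of_find?_eq_some hft
      have htend : PySem.Chars.endswith r ('_' :: t) = true := by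
        simpa using List.find?_some hft
      have htsuf : ('_' :: t) <:+ r := (PySem.Chars.endswith_iff _ _).mp htend
      have hpair : PySem.Chars.endswith s ('_' :: t ++ '_' :: w) = true :=
        (pv_pair_test_iff s t w).mpr ⟨hwsuf, htsuf⟩
      rw [pv_scanTransformers_hit (List.Sublist.refl _) htmem hwmem htmem hpair]
      dsimp only
      -- both sides now: A's column ops vs pvHit
      have hwlen : w.length + 1 ≤ s.length := by
        have := hwsuf.length_le; simpa using this
      have htlen : t.length + 1 ≤ r.length := by
        have := htsuf.length_le; simpa using this
      have hrlen : r.length = s.length - (w.length + 1) := by simp [hr]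
      have hcolA : PySem.List.slice r none (some (-((t.length + 1 : Nat) : Int)))
          = r.take (r.length - (t.length + 1)) :=
        PySem.List.slice_to_neg_natCast (k := t.length + 1) r (Nat.succ_pos _)
      have hcolB : PySem.List.slice s none
            (some (-(((('_' :: t ++ '_' :: w).length) : Nat) : Int)))
          = s.take (s.length - ('_' :: t ++ '_' :: w).length) :=
        PySem.List.slice_to_neg_natCast (k := ('_' :: t ++ '_' :: w).length) s (by simp)
      have hcols : r.take (r.length - (t.length + 1))
          = s.take (s.length - ('_' :: t ++ '_' :: w).length) := by
        rw [hr, List.take_take, hrlen]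
        congr 1
        simp
        omega
      rw [pvHit]
      rw [hcolA, hcolB, hcols]
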